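-- pv_equiv track=rewrite | github.com/icholy/building_code | download.py | stitch_fragments
-- ===== SOURCE A (Python) =====
-- def stitch_fragments(entries):
--     prev = None
--     out_entries = []
--     for entry in entries:
--         if entry["tag"] == "fragment":
--             prev["html"] += " " + entry["html"]
--             prev["text"] += " " + entry["text"]
--         else:
--             out_entries.append(entry)
--             prev = entry
--     return out_entries
-- ===== SOURCE B (Python) =====
-- def stitch_fragments(entries):
--     # Two-pass grouping: collect each base with its fragments' pieces, then join once.
--     groups = []
--     for entry in entries:
--         if entry["tag"] == "fragment":
--             _, htmls, texts = groups[-1]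
--             htmls.append(entry["html"])
--             texts.append(entry["text"])
--         else:
--             groups.append((entry, [], []))
--     for base, htmls, texts in groups:
--         if htmls:
--             base["html"] = base["html"] + " " + " ".join(htmls)
--             base["text"] = base["text"] + " " + " ".join(texts)
--     return [base for base, _, _ in groups]
-- ===== Notes on version B (the rewrite author's own statement) =====
-- stated objective: alternative
-- what changed: Instead of mutating the previous base after every fragment with repeated '+= " " + piece' string concatenations, B first partitions the entries into groups (base plus the list of its fragments' html/text pieces) and then finishes each touched base with a single ' '.join per field, mutating the same base dicts in place.
import Mathlib
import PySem

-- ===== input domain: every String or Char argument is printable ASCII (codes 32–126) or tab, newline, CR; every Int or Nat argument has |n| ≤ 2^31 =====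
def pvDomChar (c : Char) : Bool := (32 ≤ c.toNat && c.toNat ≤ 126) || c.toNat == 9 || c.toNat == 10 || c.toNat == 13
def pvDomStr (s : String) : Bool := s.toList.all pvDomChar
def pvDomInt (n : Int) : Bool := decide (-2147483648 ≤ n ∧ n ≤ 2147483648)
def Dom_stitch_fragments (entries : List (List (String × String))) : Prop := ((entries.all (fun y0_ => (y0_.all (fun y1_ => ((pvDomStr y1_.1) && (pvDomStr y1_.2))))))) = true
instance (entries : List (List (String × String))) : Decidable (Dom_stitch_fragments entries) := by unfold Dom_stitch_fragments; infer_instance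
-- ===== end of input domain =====

-- B merges all fragments of a base with a single ' '.join per field (two-pass grouping) instead of
-- A's incremental '+=' on the previous base at every fragment; return-value equivalence is proved
-- (both Pythons also mutate the same base dicts in place, identically).

-- ===== PORT A =====
-- dict primitives (Python dict getitem/setitem on the assoc-list encoding, via PySem.Dict;
-- pvGet defaults to "" where Python raises KeyError — those inputs are outside Pre_)
def pvGet (d : List (String × String)) (k : String) : String :=
  (PySem.Dict.mk d).getD k ""
def pvSet (d : List (String × String)) (k : String) (v : String) : List (String × String) :=
  ((PySem.Dict.mk d).insert k v).items
-- prev["html"] += " " + entry["html"]; prev["text"] += " " + entry["text"]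
def pvFragUpd (prev : List (String × String)) (h t : String) : List (String × String) :=
  pvSet (pvSet prev "html" (pvGet prev "html" ++ " " ++ h)) "text" (pvGet prev "text" ++ " " ++ t)
-- loop body of A; since Python's 'prev' is an alias of the last element of out_entries (or None when
-- out_entries is empty), the in-place mutation of prev IS an update of out's last element
def pvStepA (out : List (List (String × String))) (entry : List (String × String)) :
    List (List (String × String)) :=
  if pvGet entry "tag" == "fragment" then
    match out.getLast? with
    | none => out   -- Python: prev is None here → TypeError; outside Pre_
    | some prev => out.dropLast ++ [pvFragUpd prev (pvGet entry "html") (pvGet entry "text")]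
  else out ++ [entry]

def stitch_fragments (entries : List (List (String × String))) : List (List (String × String)) :=
  entries.foldl pvStepA []

-- ===== PORT B =====
-- a group: (base, html pieces, text pieces)
def pvStepB (gs : List ((List (String × String)) × List String × List String))
    (entry : List (String × String)) :
    List ((List (String × String)) × List String × List String) :=
  if pvGet entry "tag" == "fragment" then
    match gs.getLast? with
    | none => gs   -- Python B: groups[-1] on empty list → IndexError; outside Pre_
    | some g => gs.dropLast ++ [(g.1, g.2.1 ++ [pvGet entry "html"], g.2.2 ++ [pvGet entry "text"])]
  else gs ++ [(entry, [], [])]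
-- second pass: base["html"] = base["html"] + " " + " ".join(htmls), likewise text, if any pieces
def pvFinalize (g : (List (String × String)) × List String × List String) :
    List (String × String) :=
  if g.2.1.isEmpty then g.1
  else pvSet (pvSet g.1 "html" (pvGet g.1 "html" ++ " " ++ PySem.Str.join " " g.2.1))
             "text" (pvGet g.1 "text" ++ " " ++ PySem.Str.join " " g.2.2)

def stitch_fragments_alt (entries : List (List (String × String))) :
    List (List (String × String)) :=
  ((entries.foldl pvStepB []).map pvFinalize)

-- ===== PRECONDITION & SPEC =====
def pvHasKey (e : List (String × String)) (k : String) : Bool := (PySem.Dict.mk e).contains k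
def pvTag (e : List (String × String)) : String := (PySem.Dict.mk e).getD "tag" ""
def pvEnt (entries : List (List (String × String))) (i : Nat) : List (String × String) :=
  entries.getD i []
-- Pre_ excludes (a) assoc lists with duplicate keys inside an entry — they encode no Python dict and
-- first-match vs last-wins readings diverge — and (b) exactly the inputs on which A raises: an entry
-- without a "tag" key (KeyError), a fragment entry without "html"/"text" (KeyError), a fragment with
-- no preceding non-fragment entry (TypeError on prev None), or one whose nearest preceding
-- non-fragment base lacks "html"/"text" (KeyError on the first += of the group).
def Pre_stitch_fragments (entries : List (List (String × String))) : Prop :=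
  (∀ e ∈ entries, (e.map Prod.fst).Nodup) ∧
  ∀ i < entries.length,
    pvHasKey (pvEnt entries i) "tag" = true ∧
    (pvTag (pvEnt entries i) = "fragment" →
      pvHasKey (pvEnt entries i) "html" = true ∧
      pvHasKey (pvEnt entries i) "text" = true ∧
      ∃ j < i, pvTag (pvEnt entries j) ≠ "fragment" ∧
        pvHasKey (pvEnt entries j) "html" = true ∧
        pvHasKey (pvEnt entries j) "text" = true ∧
        ∀ m < i, j < m → pvTag (pvEnt entries m) = "fragment")
instance (entries : List (List (String × String))) : Decidable (Pre_stitch_fragments entries) := by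
  unfold Pre_stitch_fragments; infer_instance

def pvWitness_stitch_fragments : (List (List (String × String))) :=
  [[("tag", "entry"), ("html", "<p>a</p>"), ("text", "a")],
   [("tag", "fragment"), ("html", "<p>b</p>"), ("text", "b")]]

def Spec_stitch_fragments (entries : List (List (String × String)))
    (out : List (List (String × String))) : Prop := out = stitch_fragments_alt entries
instance (entries : List (List (String × String))) (out : List (List (String × String))) :
    Decidable (Spec_stitch_fragments entries out) := by unfold Spec_stitch_fragments; infer_instance

-- ===== CLAIM (what is proved, stated in full; the proofs are below) =====
def Claim_equal_stitch_fragments : Prop := ∀ (entries : List (List (String × String))), Dom_stitch_fragments entries → Pre_stitch_fragments entries → Spec_stitch_fragments entries (stitch_fragments entries)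

-- ===== LEMMAS AND PROOFS =====

-- a group collected by pvStepB has html pieces iff it has text pieces
def pvGood (g : (List (String × String)) × List String × List String) : Prop :=
  (g.2.1 = [] ↔ g.2.2 = [])

theorem pvChars_join_append_singleton (sep c : List Char) (l : List (List Char)) (hl : l ≠ []) :
    PySem.Chars.join sep (l ++ [c]) = PySem.Chars.join sep l ++ sep ++ c := by
  induction l with
  | nil => exact absurd rfl hl
  | cons a r ih =>
    cases r with
    | nil => simp [PySem.Chars.join_cons_cons, PySem.Chars.join_singleton]
    | cons b r' =>
      have ihh := ih (by simp)
      rw [List.cons_append] at ihh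
      rw [List.cons_append, List.cons_append, PySem.Chars.join_cons_cons, ihh,
        PySem.Chars.join_cons_cons]
      simp [List.append_assoc]

theorem pvJoin_append_singleton (hs : List String) (h : String) (hne : hs ≠ []) :
    PySem.Str.join " " (hs ++ [h]) = PySem.Str.join " " hs ++ " " ++ h := by
  apply String.toList_injective
  rw [String.toList_append, String.toList_append, PySem.Str.toList_join, PySem.Str.toList_join,
    List.map_append, List.map_singleton,
    pvChars_join_append_singleton _ _ _ (by simpa using hne)]

theorem pvMk_items (d : PySem.Dict String String) : PySem.Dict.mk d.items = d := rfl

theorem pvNoKey (d : PySem.Dict String String) (k : String) (hk : d.contains k = false) :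
    ∀ p ∈ d.items, (p.1 == k) = false := by
  intro p hp
  rw [beq_eq_false_iff_ne]
  intro he
  have hmem : k ∈ d.keys := by
    simp only [PySem.Dict.keys]
    exact he ▸ List.mem_map_of_mem hp
  rw [PySem.Dict.contains_eq_decide_mem_keys] at hk
  simp only [decide_eq_false_iff_not] at hk
  exact hk hmem

theorem pvIns_swap (d : PySem.Dict String String) (k1 k2 : String) (hne : k1 ≠ k2)
    (x y x' : String) :
    ((d.insert k1 x).insert k2 y).insert k1 x' = (d.insert k1 x').insert k2 y := by
  have hbne : (k1 == k2) = false := beq_eq_false_iff_ne.mpr hne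
  have hbne' : (k2 == k1) = false := beq_eq_false_iff_ne.mpr (Ne.symm hne)
  have hA : d.contains k1 = false →
      d.items.map (fun p : String × String => if p.1 = k1 then (k1, x') else p) = d.items := by
    intro h
    have hid : ∀ p ∈ d.items,
        (fun p : String × String => if p.1 = k1 then (k1, x') else p) p = id p := fun p hp => by
      simp [beq_eq_false_iff_ne.mp (pvNoKey d k1 h p hp)]
    rw [List.map_congr_left hid, List.map_id]
  apply PySem.Dict.ext
  cases h1 : d.contains k1 <;> cases h2 : d.contains k2
  · simp [PySem.Dict.items_insert, PySem.Dict.contains_insert, h1, h2, hbne, hbne',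
      hA h1, Ne.symm hne]
  · simp only [PySem.Dict.items_insert, PySem.Dict.contains_insert, h1, h2, hbne, hbne']
    simp [hne]
    intro a b hab h'
    by_cases ha : a = k2
    · rw [ha] at h'; simp at h'; exact absurd h'.symm hne
    · simp [ha] at h'
      exact absurd h' (beq_eq_false_iff_ne.mp (pvNoKey d k1 h1 (a, b) hab))
  · simp only [PySem.Dict.items_insert, PySem.Dict.contains_insert, h1, h2, hbne, hbne']
    simp [Ne.symm hne]
    intro a b hab
    by_cases ha : a = k1 <;> simp [ha]
  · simp only [PySem.Dict.items_insert, PySem.Dict.contains_insert, h1, h2, hbne, hbne']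
    simp
    intro a b hab
    by_cases ha1 : a = k1
    · by_cases ha2 : a = k2
      · exact absurd (ha1.symm.trans ha2) hne
      · simp [ha1, hne]
    · by_cases ha2 : a = k2 <;> simp [ha1, ha2, Ne.symm hne]

theorem pvSet_swap (b : List (String × String)) (x y x' y' : String) :
    pvSet (pvSet (pvSet (pvSet b "html" x) "text" y) "html" x') "text" y'
      = pvSet (pvSet b "html" x') "text" y' := by
  simp only [pvSet, pvMk_items]
  rw [pvIns_swap (PySem.Dict.mk b) "html" "text" (by decide) x y x',
    PySem.Dict.insert_insert_self]

theorem pvGet_pvSet (d : List (String × String)) (k k' v : String) :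
    pvGet (pvSet d k v) k' = if k' = k then v else pvGet d k' := by
  simp only [pvGet, pvSet, pvMk_items, PySem.Dict.getD_insert]

theorem pvDropLast_map {α β : Type} (f : α → β) (l : List α) :
    (l.map f).dropLast = l.dropLast.map f := by
  induction l with
  | nil => rfl
  | cons a t ih =>
    cases t with
    | nil => rfl
    | cons b m => simp [List.dropLast_cons₂]

-- the merging step: extending a group's pieces then joining = joining then one more '+='
theorem pvFinalize_step (b : List (String × String)) (hs ts : List String) (h t : String)
    (hg : hs = [] ↔ ts = []) :
    pvFinalize (b, hs ++ [h], ts ++ [t]) = pvFragUpd (pvFinalize (b, hs, ts)) h t := by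
  by_cases hhs : hs = []
  · have hts : ts = [] := hg.mp hhs
    subst hhs; subst hts
    have j1 : ∀ s : String, PySem.Str.join " " [s] = s := fun s =>
      String.toList_injective (by rw [PySem.Str.toList_join]; simp [PySem.Chars.join_singleton])
    simp [pvFinalize, pvFragUpd, j1]
  · have hts : ts ≠ [] := fun h' => hhs (hg.mpr h')
    have h1 : (hs ++ [h]).isEmpty = false := by simp
    have h2 : hs.isEmpty = false := by simp [hhs]
    simp only [pvFinalize, pvFragUpd, h1, h2, Bool.false_eq_true, if_false]
    simp only [pvGet_pvSet]
    simp only [if_neg (by decide : ¬ (("html" : String) = "text"))]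
    rw [pvJoin_append_singleton _ _ hhs, pvJoin_append_singleton _ _ hts, pvSet_swap]
    simp [String.append_assoc]

theorem pvStep_comm (gs : List ((List (String × String)) × List String × List String))
    (e : List (String × String)) (hgs : ∀ g ∈ gs, pvGood g) :
    pvStepA (gs.map pvFinalize) e = (pvStepB gs e).map pvFinalize := by
  simp only [pvStepA, pvStepB]
  cases hf : (pvGet e "tag" == "fragment") <;>
    simp only [Bool.false_eq_true, if_false, if_true, List.getLast?_map]
  · simp [pvFinalize]
  · cases hlast : gs.getLast? with
    | none => simp
    | some g =>
      have hmemg : g ∈ gs := List.mem_of_getLast? hlast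
      simp only [Option.map_some, List.map_append, List.map_cons, List.map_nil]
      rw [pvDropLast_map]
      congr 1
      rw [← pvFinalize_step g.1 g.2.1 g.2.2 _ _ (hgs g hmemg)]

theorem pvStepB_good (gs : List ((List (String × String)) × List String × List String))
    (e : List (String × String)) (hgs : ∀ g ∈ gs, pvGood g) :
    ∀ g ∈ pvStepB gs e, pvGood g := by
  intro g hg
  simp only [pvStepB] at hg
  split at hg
  · cases hlast : gs.getLast? with
    | none => rw [hlast] at hg; exact hgs g hg
    | some g0 =>
      rw [hlast] at hg
      rcases List.mem_append.mp hg with hmem | hmem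
      · exact hgs g (List.dropLast_subset _ hmem)
      · simp only [List.mem_singleton] at hmem
        subst hmem; constructor <;> simp
  · rcases List.mem_append.mp hg with hmem | hmem
    · exact hgs g hmem
    · simp only [List.mem_singleton] at hmem
      subst hmem; exact Iff.rfl

theorem pvFold_comm (entries : List (List (String × String)))
    (gs : List ((List (String × String)) × List String × List String))
    (hgs : ∀ g ∈ gs, pvGood g) :
    entries.foldl pvStepA (gs.map pvFinalize) = (entries.foldl pvStepB gs).map pvFinalize := by
  induction entries generalizing gs with
  | nil => rfl
  | cons e rest ih =>
    simp only [List.foldl_cons]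
    rw [pvStep_comm gs e hgs]
    exact ih (pvStepB gs e) (pvStepB_good gs e hgs)

-- ===== VERDICT (by name: the statement is the Claim_ definition above) =====
theorem stitch_fragments_spec : Claim_equal_stitch_fragments := by
  intro entries _ _
  unfold Spec_stitch_fragments stitch_fragments stitch_fragments_alt
  simpa using pvFold_comm entries [] (by simp)
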